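-- pv_equiv track=rewrite | github.com/ioaksenenko/neural_networks | utilities/datamaker/versions/v1.0/main.py | number_input_question_generate
-- ===== SOURCE A (Python) =====
-- def number_input_question_generate(n=1, is_item=True):
--     inputs = []
--     outputs = []
--     for i in range(n):
--         input = "_"
--         output = ("[item]" if is_item else "") + "_ "
--         for j in range(i + 1):
--             input += '{#_}_'
--             output += (". . " + ("[numberinput]" if j == 0 else "") +
--                        "[answer]_[/answer] . " + ("_ " if j != i else ""))
--         output += "_[/numberinput]" + ("[/item]" if is_item else "")
--         inputs.append(input)
--         outputs.append(output)
--     return inputs, outputs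
-- ===== SOURCE B (Python) =====
-- def number_input_question_generate(n=1, is_item=True):
--     head = ("[item]" if is_item else "") + "_ "
--     tail = "_[/numberinput]" + ("[/item]" if is_item else "")
--     inputs = []
--     outputs = []
--     inp = "_"
--     mid = ""
--     for i in range(n):
--         inp = inp + "{#_}_"
--         mid = mid + (". . [numberinput]" if i == 0 else "_ . . ") + "[answer]_[/answer] . "
--         inputs.append(inp)
--         outputs.append(head + mid + tail)
--     return inputs, outputs
-- ===== Notes on version B (the rewrite author's own statement) =====
-- stated objective: alternative
-- what changed: The per-row inner loop is removed entirely: B builds each row incrementally from the previous row's strings (input and the output middle each grow by one fixed literal per outer iteration), whereas A rebuilds every row from scratch with a nested j-loop and a conditional trailing separator.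
import Mathlib
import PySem

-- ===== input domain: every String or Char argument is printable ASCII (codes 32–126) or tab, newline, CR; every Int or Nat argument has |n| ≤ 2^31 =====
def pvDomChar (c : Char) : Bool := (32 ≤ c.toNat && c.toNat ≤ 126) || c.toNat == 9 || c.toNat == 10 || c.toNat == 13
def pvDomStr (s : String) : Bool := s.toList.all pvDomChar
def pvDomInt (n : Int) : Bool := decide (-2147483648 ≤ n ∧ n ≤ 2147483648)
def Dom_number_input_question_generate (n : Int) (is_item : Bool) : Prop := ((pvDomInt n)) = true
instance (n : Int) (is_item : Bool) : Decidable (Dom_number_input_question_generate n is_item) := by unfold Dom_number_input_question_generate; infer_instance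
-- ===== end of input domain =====

-- B removes A's nested j-loop: each row's input and output-middle are grown
-- incrementally from the previous row's strings in a single pass (objective: alternative).


-- ===== PORT A =====
def number_input_question_generate (n : Int) (is_item : Bool) : List String × List String :=
  (PySem.List.pyRange 0 n 1).foldl (fun (acc : List String × List String) i =>
    let input : String := "_"
    let output : String := (if is_item then "[item]" else "") ++ "_ "
    let p := (PySem.List.pyRange 0 (i + 1) 1).foldl (fun (p : String × String) j =>
        (p.1 ++ "{#_}_",
         p.2 ++ (". . " ++ (if j == 0 then "[numberinput]" else "") ++
                 "[answer]_[/answer] . " ++ (if j != i then "_ " else ""))))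
      (input, output)
    let output := p.2 ++ "_[/numberinput]" ++ (if is_item then "[/item]" else "")
    (acc.1 ++ [p.1], acc.2 ++ [output])) ([], [])

-- ===== PORT B =====
def number_input_question_generate_alt (n : Int) (is_item : Bool) : List String × List String :=
  let head := (if is_item then "[item]" else "") ++ "_ "
  let tail := "_[/numberinput]" ++ (if is_item then "[/item]" else "")
  let st := (PySem.List.pyRange 0 n 1).foldl
    (fun (st : (String × String) × (List String × List String)) i =>
      let inp := st.1.1 ++ "{#_}_"
      let mid := st.1.2 ++ (if i == 0 then ". . [numberinput]" else "_ . . ") ++ "[answer]_[/answer] . "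
      ((inp, mid), (st.2.1 ++ [inp], st.2.2 ++ [head ++ mid ++ tail])))
    (("_", ""), ([], []))
  st.2

-- ===== PRECONDITION & SPEC =====
def Spec_number_input_question_generate (n : Int) (is_item : Bool) (out : List String × List String) : Prop := out = number_input_question_generate_alt n is_item
instance (n : Int) (is_item : Bool) (out : List String × List String) : Decidable (Spec_number_input_question_generate n is_item out) := by unfold Spec_number_input_question_generate; infer_instance

-- ===== CLAIM (what is proved, stated in full; the proofs are below) =====
def Claim_equal_number_input_question_generate : Prop := ∀ (n : Int) (is_item : Bool), Dom_number_input_question_generate n is_item → Spec_number_input_question_generate n is_item (number_input_question_generate n is_item)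

-- ===== LEMMAS AND PROOFS =====

-- closed descriptions of B's two running strings after k outer iterations
def inpF : Nat → String
  | 0 => "_"
  | k + 1 => inpF k ++ "{#_}_"

def midF : Nat → String
  | 0 => ""
  | k + 1 => midF k ++ (if k = 0 then ". . [numberinput]" else "_ . . ") ++ "[answer]_[/answer] . "

-- the j-th segment A's inner loop appends (without the conditional trailing "_ ")
def segN (k : Nat) : String :=
  ". . " ++ (if k = 0 then "[numberinput]" else "") ++ "[answer]_[/answer] . "

-- A's inner loop with trailing "_ " on every step (all j < i)
def TF : Nat → String
  | 0 => ""
  | k + 1 => TF k ++ segN k ++ "_ "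

-- A's inner input loop, started from "_", builds inpF (peeling the last index)
theorem inputA_eq (m : Nat) :
    (PySem.List.pyRange 0 (m : Int) 1).foldl (fun (p : String) _ => p ++ "{#_}_") "_"
      = inpF m := by
  induction m with
  | zero => simp [PySem.List.pyRange_one_eq_nil, inpF]
  | succ k ih =>
      rw [show ((k + 1 : Nat) : Int) = (k : Int) + 1 by push_cast; ring,
          PySem.List.pyRange_one_succ_right (by positivity)]
      rw [List.foldl_append, ih]
      rfl

-- A's inner output loop over a strict prefix of row i (every j there has j ≠ i)
theorem outputA_prefix (i : Int) : ∀ (k : Nat), (k : Int) ≤ i → ∀ (s : String),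
    (PySem.List.pyRange 0 (k : Int) 1).foldl (fun (p : String) j =>
        p ++ (". . " ++ (if j == 0 then "[numberinput]" else "") ++
              "[answer]_[/answer] . " ++ (if j != i then "_ " else ""))) s
      = s ++ TF k := by
  intro k
  induction k with
  | zero => intro _ s; simp [PySem.List.pyRange_one_eq_nil, TF]
  | succ k ih =>
      intro hk s
      rw [show ((k + 1 : Nat) : Int) = (k : Int) + 1 by push_cast; ring,
          PySem.List.pyRange_one_succ_right (by positivity)]
      rw [List.foldl_append, ih (by omega) s]
      simp only [List.foldl_cons, List.foldl_nil]
      rw [← String.toList_inj]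
      by_cases h0 : k = 0
      · subst h0
        simp [TF, segN, String.toList_append, show (0 : Int) ≠ i by omega]
      · simp [TF, segN, h0, String.toList_append, show ¬((k : Int) = i) by omega]

-- midF is TF plus the final, untrailed segment
theorem midF_eq (k : Nat) : midF (k + 1) = TF k ++ segN k := by
  induction k with
  | zero =>
      rw [← String.toList_inj]; simp [midF, TF, segN]
  | succ k ih =>
      rw [← String.toList_inj,
          show midF (k + 1 + 1) = midF (k + 1) ++ (if k + 1 = 0 then ". . [numberinput]" else "_ . . ") ++ "[answer]_[/answer] . " from rfl,
          ih]
      simp [TF, segN, String.toList_append]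

-- A's whole inner output loop for row i = k builds midF (k+1)
theorem outputA_full (k : Nat) (s : String) :
    (PySem.List.pyRange 0 ((k + 1 : Nat) : Int) 1).foldl (fun (p : String) j =>
        p ++ (". . " ++ (if j == 0 then "[numberinput]" else "") ++
              "[answer]_[/answer] . " ++ (if j != (k : Int) then "_ " else ""))) s
      = s ++ midF (k + 1) := by
  rw [show ((k + 1 : Nat) : Int) = (k : Int) + 1 by push_cast; ring,
      PySem.List.pyRange_one_succ_right (by positivity)]
  rw [List.foldl_append, outputA_prefix (k : Int) k le_rfl s]
  simp only [List.foldl_cons, List.foldl_nil]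
  rw [midF_eq k, ← String.toList_inj]
  by_cases h0 : k = 0
  · subst h0; simp [segN, String.toList_append]
  · simp [segN, h0, String.toList_append]

-- the loop invariant: B's running pair is (inpF k, midF k) and both folds build the same lists
theorem loop_inv (is_item : Bool) : ∀ (m k : Nat) (ls : List String × List String),
    (PySem.List.pyRange (k : Int) ((k : Int) + (m : Int)) 1).foldl
      (fun (acc : List String × List String) i =>
        let input : String := "_"
        let output : String := (if is_item then "[item]" else "") ++ "_ "
        let p := (PySem.List.pyRange 0 (i + 1) 1).foldl (fun (p : String × String) j =>
            (p.1 ++ "{#_}_",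
             p.2 ++ (". . " ++ (if j == 0 then "[numberinput]" else "") ++
                     "[answer]_[/answer] . " ++ (if j != i then "_ " else ""))))
          (input, output)
        let output := p.2 ++ "_[/numberinput]" ++ (if is_item then "[/item]" else "")
        (acc.1 ++ [p.1], acc.2 ++ [output])) ls
    = ((PySem.List.pyRange (k : Int) ((k : Int) + (m : Int)) 1).foldl
        (fun (st : (String × String) × (List String × List String)) i =>
          let inp := st.1.1 ++ "{#_}_"
          let mid := st.1.2 ++ (if i == 0 then ". . [numberinput]" else "_ . . ") ++ "[answer]_[/answer] . "
          ((inp, mid), (st.2.1 ++ [inp],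
            st.2.2 ++ [((if is_item then "[item]" else "") ++ "_ ") ++ mid ++
                       ("_[/numberinput]" ++ (if is_item then "[/item]" else ""))])))
        ((inpF k, midF k), ls)).2 := by
  intro m
  induction m with
  | zero =>
      intro k ls
      simp [PySem.List.pyRange_one_eq_nil]
  | succ m ih =>
      intro k ls
      rw [show ((k : Int) + ((m + 1 : Nat) : Int)) = ((k + 1 : Nat) : Int) + (m : Int) by push_cast; ring]
      rw [PySem.List.pyRange_one_cons (by push_cast; omega)]
      simp only [List.foldl_cons]
      -- B's running strings after the step are (inpF (k+1), midF (k+1))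
      have hmid : midF k ++ (if ((k : Nat) : Int) == 0 then ". . [numberinput]" else "_ . . ") ++ "[answer]_[/answer] . "
          = midF (k + 1) := by
        by_cases h0 : k = 0
        · subst h0; simp [midF]
        · rw [show (((k : Nat) : Int) == 0) = false by simp [h0],
              show midF (k + 1) = midF k ++ (if k = 0 then ". . [numberinput]" else "_ . . ") ++ "[answer]_[/answer] . " from rfl,
              if_neg h0]
          rfl
      -- A's row built by the inner loop is the same pair of strings
      rw [show ((k : Int) + 1) = ((k + 1 : Nat) : Int) by push_cast; ring]
      rw [PySem.List.foldl_prod_mk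
        (f := fun (x : String) (_ : Int) => x ++ "{#_}_")
        (g := fun (x : String) (j : Int) =>
          x ++ (". . " ++ (if j == 0 then "[numberinput]" else "") ++
                "[answer]_[/answer] . " ++ (if j != (k : Int) then "_ " else "")))]
      rw [inputA_eq (k + 1), outputA_full k ((if is_item then "[item]" else "") ++ "_ "), hmid]
      -- the appended output strings differ only in append grouping
      have hy : (((if is_item then "[item]" else "") ++ "_ ") ++ midF (k + 1)) ++ "_[/numberinput]" ++ (if is_item then "[/item]" else "")
          = (((if is_item then "[item]" else "") ++ "_ ") ++ midF (k + 1)) ++ ("_[/numberinput]" ++ (if is_item then "[/item]" else "")) := by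
        rw [← String.toList_inj]; simp [String.toList_append]
      rw [hy]
      exact ih (k + 1) _

-- ===== VERDICT (by name: the statement is the Claim_ definition above) =====
theorem number_input_question_generate_spec : Claim_equal_number_input_question_generate := by
  intro n is_item _
  unfold Spec_number_input_question_generate
  unfold number_input_question_generate number_input_question_generate_alt
  by_cases hn : n ≤ 0
  · rw [PySem.List.pyRange_one_eq_nil hn]
    rfl
  · have h0 : n = ((n.toNat : Nat) : Int) := by omega
    have := loop_inv is_item n.toNat 0 ([], [])
    simp only [Nat.cast_zero, zero_add] at this
    rw [h0]
    exact this
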